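-- pv_equiv track=rewrite | github.com/enriquegalicia/Tool-Deployment-Order | TestFit_Layout/BIM RA/ModClass.py | cleandic
-- ===== SOURCE A (Python) =====
-- def cleandic(list3,DSCA):
-- 	list2=[]
-- 	for a in list3:
-- 		list2.append(DSCA.get(str(a)))
-- 	POST=[]
-- 	PRE=[]
-- 	PRE.append(0)
-- 	for a in range(len(list2)):
-- 		if a+1<len(list2):
-- 			if list2[a+1]+1!=(list2[a]):
-- 				POST.append(a)
-- 				PRE.append(a+1)
-- 			else:
-- 				pass
-- 	POST.append(len(list2)-1)
-- 	VAL=[]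
-- 	for a,b in zip(PRE,POST):
-- 		X=b-a
-- 		for c in range(b-a+1):
-- 			VAL.append(X)
-- 			X=X-1
-- 	return VAL
-- ===== SOURCE B (Python) =====
-- def cleandic(list3, DSCA):
--     list2 = [DSCA.get(str(a)) for a in list3]
--     n = len(list2)
--     VAL = [0] * n
--     for i in range(n - 2, -1, -1):
--         VAL[i] = VAL[i + 1] + 1 if list2[i + 1] + 1 == list2[i] else 0
--     return VAL
-- ===== Notes on version B (the rewrite author's own statement) =====
-- stated objective: simpler
-- what changed: Replaces A's three-phase construction (collect PRE/POST segment-boundary lists, then nested countdown fills) by a single backward pass that sets VAL[i] = VAL[i+1]+1 when the descending-by-1 run continues and 0 at a run end.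
import Mathlib
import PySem

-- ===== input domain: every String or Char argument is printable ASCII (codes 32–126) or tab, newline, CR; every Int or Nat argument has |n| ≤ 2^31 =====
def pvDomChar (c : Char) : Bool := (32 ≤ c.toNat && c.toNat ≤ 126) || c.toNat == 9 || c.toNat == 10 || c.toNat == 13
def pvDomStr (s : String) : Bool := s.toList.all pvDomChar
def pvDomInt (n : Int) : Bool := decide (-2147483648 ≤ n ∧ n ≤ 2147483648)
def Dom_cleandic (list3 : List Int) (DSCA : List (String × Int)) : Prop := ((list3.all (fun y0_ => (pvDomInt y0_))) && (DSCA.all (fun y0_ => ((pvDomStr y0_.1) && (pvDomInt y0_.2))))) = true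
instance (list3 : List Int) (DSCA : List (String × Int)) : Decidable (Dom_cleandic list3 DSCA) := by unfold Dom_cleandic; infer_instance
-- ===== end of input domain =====

-- B replaces A's PRE/POST boundary lists and nested countdown fills by one backward pass (simpler).


-- ===== PORT A =====
-- literal transliteration of A; list2[a] / list2[a+1] use PySem.List.pyGetD (indices are
-- guaranteed in range by the loop's own `a+1 < len(list2)` guard, so the default is never used
-- on admitted inputs); the None+1 that Python raises TypeError on is excluded by Pre_ below.
def cleandic (list3 : List Int) (DSCA : List (String × Int)) : List Int :=
  let list2 : List (Option Int) :=
    list3.foldl (fun acc a => acc ++ [PySem.Dict.get? (PySem.Dict.ofList DSCA) (PySem.Int.toStr a)]) []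
  let n : Int := list2.length
  let pp :=
    (PySem.List.pyRange 0 n 1).foldl
      (fun (st : List Int × List Int) a =>
        if a + 1 < n then
          if Option.map (· + 1) (PySem.List.pyGetD list2 (a + 1) none) ≠ PySem.List.pyGetD list2 a none then
            (st.1 ++ [a], st.2 ++ [a + 1])
          else st
        else st)
      ([], [0])
  let POST := pp.1 ++ [n - 1]
  let PRE := pp.2
  (PRE.zip POST).foldl
    (fun VAL p =>
      ((PySem.List.pyRange 0 (p.2 - p.1 + 1) 1).foldl
        (fun (st : List Int × Int) _ => (st.1 ++ [st.2], st.2 - 1)) (VAL, p.2 - p.1)).1)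
    []

-- ===== PORT B =====
-- backward fill: VAL[i] = VAL[i+1]+1 if list2[i+1]+1 == list2[i] else 0, VAL[-1] = 0,
-- written as the obvious back-to-front structural recursion over list2.
def fillB : List (Option Int) → List Int
  | [] => []
  | [_] => [0]
  | x :: y :: rest =>
    match fillB (y :: rest) with
    | [] => []          -- unreachable: fillB of a nonempty list is nonempty
    | v :: vs => (if Option.map (· + 1) y = x then v + 1 else 0) :: v :: vs

def cleandic_alt (list3 : List Int) (DSCA : List (String × Int)) : List Int :=
  fillB (list3.map (fun a => PySem.Dict.get? (PySem.Dict.ofList DSCA) (PySem.Int.toStr a)))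

-- ===== PRECONDITION & SPEC =====
-- A raises TypeError (None + 1) exactly when some element of list3 past the first has no entry
-- in DSCA (a missing key at position 0 only ever sits on the right of `!=` and is harmless);
-- B raises on the same inputs, so they lie outside Pre_.
def Pre_cleandic (list3 : List Int) (DSCA : List (String × Int)) : Prop :=
  ∀ a ∈ list3.drop 1, (PySem.Dict.get? (PySem.Dict.ofList DSCA) (PySem.Int.toStr a)).isSome
instance (list3 : List Int) (DSCA : List (String × Int)) : Decidable (Pre_cleandic list3 DSCA) := by
  unfold Pre_cleandic; infer_instance
def pvWitness_cleandic : List Int × (List (String × Int)) :=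
  ([5, 4, 3, 7], [("5", 5), ("4", 4), ("3", 3), ("7", 7)])

def Spec_cleandic (list3 : List Int) (DSCA : List (String × Int)) (out : List Int) : Prop := out = cleandic_alt list3 DSCA
instance (list3 : List Int) (DSCA : List (String × Int)) (out : List Int) : Decidable (Spec_cleandic list3 DSCA out) := by unfold Spec_cleandic; infer_instance

-- ===== CLAIM (what is proved, stated in full; the proofs are below) =====
def Claim_equal_cleandic : Prop := ∀ (list3 : List Int) (DSCA : List (String × Int)), Dom_cleandic list3 DSCA → Pre_cleandic list3 DSCA → Spec_cleandic list3 DSCA (cleandic list3 DSCA)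

-- ===== LEMMAS AND PROOFS =====

-- Both programs depend only on the boundary pattern "list2[a+1]+1 != list2[a]" of the mapped
-- list l2; the equivalence below is unconditional in l2 (Pre_ matters only for the Python side).

def bnd : List (Option Int) → List Int
  | [] => []
  | [_] => []
  | x :: y :: rest =>
    (if Option.map (· + 1) y ≠ x then [(0 : Int)] else []) ++ (bnd (y :: rest)).map (· + 1)

def cnt (k : Int) : List Int := (List.range (k + 1).toNat).map (fun (c : Nat) => k - (c : Int))

-- pairfold
theorem pairfold (n : Int) (c : Int → Prop) [DecidablePred c] : ∀ (L : List Int) (u v : List Int),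
  (L.foldl (fun (st : List Int × List Int) a => if a + 1 < n then if c a then (st.1 ++ [a], st.2 ++ [a+1]) else st else st) (u, v))
  = (u ++ L.filter (fun a => decide (a+1 < n) && decide (c a)), v ++ (L.filter (fun a => decide (a+1 < n) && decide (c a))).map (· + 1)) := by
  intro L
  induction L with
  | nil => simp
  | cons a L ih =>
    intro u v
    by_cases h1 : a + 1 < n
    · by_cases h2 : c a
      · simp [h1, h2, ih]
      · simp [h1, h2, ih]
    · simp [h1, ih]

theorem innerfold {α : Type} : ∀ (L : List α) (val : List Int) (X : Int),
    (L.foldl (fun (st : List Int × Int) _ => (st.1 ++ [st.2], st.2 - 1)) (val, X)).1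
      = val ++ (List.range L.length).map (fun (c : Nat) => X - (c : Int)) := by
  intro L
  induction L with
  | nil => simp
  | cons a L ih =>
    intro val X
    rw [List.foldl_cons, ih, List.length_cons, List.range_succ_eq_map, List.map_cons, List.map_map]
    simp only [Nat.cast_zero, sub_zero, List.append_assoc, List.singleton_append]
    congr 2
    apply List.map_congr_left
    intro k _
    simp only [Function.comp_apply]
    push_cast; ring

theorem pyRange_shift (m : Int) : PySem.List.pyRange 1 (m+1) 1 = (PySem.List.pyRange 0 m 1).map (· + 1) := by
  rw [PySem.List.pyRange_one, PySem.List.pyRange_one, List.map_map]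
  have h : m + 1 - 1 = m - 0 := by ring
  rw [h]
  apply List.map_congr_left
  intro k _
  simp only [Function.comp_apply]
  ring

theorem filter_eq_bnd : ∀ (l2 : List (Option Int)),
    (PySem.List.pyRange 0 (l2.length : Int) 1).filter
      (fun a => decide (a + 1 < (l2.length : Int)) &&
         decide (Option.map (· + 1) (PySem.List.pyGetD l2 (a + 1) none) ≠ PySem.List.pyGetD l2 a none))
    = bnd l2 := by
  intro l2
  induction l2 with
  | nil => simp [bnd]
  | cons x t ih =>
    cases t with
    | nil =>
      simp [bnd, PySem.List.pyRange_one, List.range_succ]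
    | cons y r =>
      have hn : (0 : Int) < ((x :: y :: r).length : Int) := by simp; omega
      rw [PySem.List.pyRange_one_cons hn]
      have hm : ((x :: y :: r).length : Int) = ((y :: r).length : Int) + 1 := by
        rw [List.length_cons]; push_cast; ring
      rw [List.filter_cons]
      simp only [zero_add]
      have hshift : PySem.List.pyRange 1 ((x :: y :: r).length : Int) 1
          = (PySem.List.pyRange 0 ((y :: r).length : Int) 1).map (· + 1) := by
        rw [hm, pyRange_shift]
      rw [hshift, List.filter_map]
      have hcong : ∀ a ∈ PySem.List.pyRange 0 ((y :: r).length : Int) 1,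
          ((fun a => decide (a + 1 < ((x :: y :: r).length : Int)) &&
            decide (Option.map (· + 1) (PySem.List.pyGetD (x :: y :: r) (a + 1) none) ≠ PySem.List.pyGetD (x :: y :: r) a none)) ∘ (· + 1)) a
          = (fun a => decide (a + 1 < ((y :: r).length : Int)) &&
            decide (Option.map (· + 1) (PySem.List.pyGetD (y :: r) (a + 1) none) ≠ PySem.List.pyGetD (y :: r) a none)) a := by
        intro a ha
        have ha0 : 0 ≤ a := (PySem.List.mem_pyRange_one.mp ha).1
        simp only [Function.comp_apply]
        have e1 : PySem.List.pyGetD (x :: y :: r) (a + 1 + 1) none = PySem.List.pyGetD (y :: r) (a + 1) none := by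
          rw [PySem.List.pyGetD_of_nonneg _ _ (by omega), PySem.List.pyGetD_of_nonneg _ _ (by omega)]
          have : (a + 1 + 1).toNat = (a + 1).toNat + 1 := by omega
          rw [this, List.getD_cons_succ]
        have e2 : PySem.List.pyGetD (x :: y :: r) (a + 1) none = PySem.List.pyGetD (y :: r) a none := by
          rw [PySem.List.pyGetD_of_nonneg _ _ (by omega), PySem.List.pyGetD_of_nonneg _ _ (by omega)]
          have : (a + 1).toNat = a.toNat + 1 := by omega
          rw [this, List.getD_cons_succ]
        rw [e1, e2]
        congr 1
        have : (a + 1 + 1 < ((x :: y :: r).length : Int)) ↔ (a + 1 < ((y :: r).length : Int)) := by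
          rw [hm]; omega
        exact decide_eq_decide.mpr this
      rw [List.filter_congr hcong, ih]
      have hg1 : PySem.List.pyGetD (x :: y :: r) (1:Int) none = y := by
        rw [PySem.List.pyGetD_of_nonneg _ _ (by omega)]; rfl
      have hg0 : PySem.List.pyGetD (x :: y :: r) (0:Int) none = x := by
        rw [PySem.List.pyGetD_of_nonneg _ _ (by omega)]; rfl
      have hlt : ((1:Int) < ((x :: y :: r).length : Int)) := by rw [hm]; simp
      simp only [hg1, hg0, decide_eq_true_eq, hlt, decide_true, Bool.true_and]
      rw [bnd]
      by_cases hc : Option.map (· + 1) y = x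
      · simp [hc]
      · simp [hc]

theorem cnt_succ (k : Int) (hk : 0 ≤ k) : cnt (k + 1) = (k + 1) :: cnt k := by
  unfold cnt
  have h : (k + 1 + 1).toNat = (k + 1).toNat + 1 := by omega
  rw [h, List.range_succ_eq_map, List.map_cons, List.map_map]
  simp only [Nat.cast_zero, sub_zero]
  congr 1
  apply List.map_congr_left
  intro c _
  simp only [Function.comp_apply]
  push_cast; ring

theorem fillB_ne_nil : ∀ (r : List (Option Int)) (y : Option Int), fillB (y :: r) ≠ [] := by
  intro r
  induction r with
  | nil => intro y; simp [fillB]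
  | cons z r' ih =>
    intro y
    cases h : fillB (z :: r') with
    | nil => exact absurd h (ih z)
    | cons v vs => simp [fillB, h]

theorem bnd_nonneg : ∀ (l : List (Option Int)), ∀ v ∈ bnd l, 0 ≤ v := by
  intro l
  induction l with
  | nil => simp [bnd]
  | cons x t ih =>
    cases t with
    | nil => simp [bnd]
    | cons y r =>
      intro v hv
      rw [bnd] at hv
      rcases List.mem_append.mp hv with h | h
      · split at h
        · simp at h; omega
        · simp at h
      · obtain ⟨w, hw, rfl⟩ := List.mem_map.mp h
        have := ih w hw
        omega

theorem gshift (Z : List (Int × Int)) :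
    (Z.map (Prod.map (· + 1) (· + 1))).flatMap (fun p => cnt (p.2 - p.1))
      = Z.flatMap (fun p => cnt (p.2 - p.1)) := by
  rw [List.flatMap_map]
  congr 1
  funext p
  have h : (Prod.map (· + 1) (· + 1) p).2 - (Prod.map (· + 1) (· + 1) p).1 = p.2 - p.1 := by
    simp [Prod.map]
  rw [h]

theorem main_cons : ∀ (r : List (Option Int)) (y : Option Int),
    ((0 :: (bnd (y :: r)).map (· + 1)).zip (bnd (y :: r) ++ [((y :: r).length : Int) - 1])).flatMap
        (fun p => cnt (p.2 - p.1)) = fillB (y :: r)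
    ∧ (fillB (y :: r)).head? = (bnd (y :: r) ++ [((y :: r).length : Int) - 1]).head? := by
  intro r
  induction r with
  | nil =>
    intro y
    norm_num [bnd, fillB, cnt]
  | cons z r' ih =>
    intro y
    obtain ⟨ihEq, ihHd⟩ := ih z
    have hlen : ((y :: z :: r').length : Int) - 1 = ((z :: r').length : Int) := by
      simp
    have hpost : (bnd (z :: r')).map (· + 1) ++ [((z :: r').length : Int)]
        = ((bnd (z :: r') ++ [((z :: r').length : Int) - 1]).map (· + 1)) := by
      simp
    cases hF : fillB (z :: r') with
    | nil => exact absurd hF (fillB_ne_nil _ z)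
    | cons v vs =>
    rw [hF] at ihEq ihHd
    by_cases hc : Option.map (· + 1) z = y
    · -- descending run continues across the junction
      have hbnd : bnd (y :: z :: r') = (bnd (z :: r')).map (· + 1) := by
        rw [bnd]; simp [hc]
      cases hB : bnd (z :: r') with
      | nil =>
        rw [hB] at ihEq ihHd
        have hn1 : (0 : Int) ≤ ((z :: r').length : Int) - 1 := by simp
        have hv : v = ((z :: r').length : Int) - 1 := by simpa using ihHd
        simp only [List.map_nil, List.nil_append, List.zip_cons_cons, List.zip_nil_right,
          List.flatMap_cons, List.flatMap_nil, List.append_nil, sub_zero] at ihEq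
        rw [hbnd, hlen, hB]
        simp only [List.map_nil, List.nil_append, List.zip_cons_cons, List.zip_nil_right,
          List.flatMap_cons, List.flatMap_nil, List.append_nil, sub_zero]
        have hsplit : cnt (((z :: r').length : Int))
            = (((z :: r').length : Int)) :: cnt (((z :: r').length : Int) - 1) := by
          have h2 := cnt_succ (((z :: r').length : Int) - 1) hn1
          simpa using h2
        rw [hsplit, ihEq, fillB, hF]
        simp only [hc, if_true]
        have hl : ((z :: r').length : Int) = v + 1 := by omega
        rw [hl, hv]
        exact ⟨rfl, rfl⟩
      | cons b0 B' =>
        rw [hB] at ihEq ihHd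
        have hb0 : 0 ≤ b0 := bnd_nonneg (z :: r') b0 (by rw [hB]; exact List.mem_cons_self)
        have hv : v = b0 := by simpa using ihHd
        -- restructure ihEq
        simp only [List.cons_append, List.zip_cons_cons, List.flatMap_cons, sub_zero] at ihEq
        -- the left-hand side
        rw [hbnd, hlen, hB]
        simp only [List.map_cons, List.cons_append, List.zip_cons_cons, List.flatMap_cons, sub_zero]
        have hmapp : (List.map (· + 1) B') ++ [((z :: r').length : Int)]
            = (B' ++ [((z :: r').length : Int) - 1]).map (· + 1) := by
          simp
        have hcons : (b0 + 1 + 1) :: List.map (· + 1) (List.map (· + 1) B')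
            = List.map (· + 1) ((b0 + 1) :: List.map (· + 1) B') := by simp
        rw [hmapp, hcons, List.zip_map, gshift]
        simp only [List.map_cons] at ihEq
        rw [cnt_succ b0 hb0, List.cons_append, ihEq, fillB, hF]
        subst hv
        simp [hc]
    · -- a run ends at the junction
      have hbnd : bnd (y :: z :: r') = 0 :: (bnd (z :: r')).map (· + 1) := by
        rw [bnd]; simp [hc]
      rw [hbnd, hlen]
      simp only [List.map_cons, List.cons_append, List.zip_cons_cons, List.flatMap_cons, sub_zero]
      have hcons : ((0 : Int) + 1) :: List.map (· + 1) (List.map (· + 1) (bnd (z :: r')))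
          = List.map (· + 1) (0 :: List.map (· + 1) (bnd (z :: r'))) := by simp
      rw [hpost, hcons, List.zip_map, gshift, ihEq, fillB, hF]
      simp only [hc, if_false]
      constructor
      · norm_num [cnt]
      · simp

def aCore (l2 : List (Option Int)) : List Int :=
  let n : Int := l2.length
  let pp :=
    (PySem.List.pyRange 0 n 1).foldl
      (fun (st : List Int × List Int) a =>
        if a + 1 < n then
          if Option.map (· + 1) (PySem.List.pyGetD l2 (a + 1) none) ≠ PySem.List.pyGetD l2 a none then
            (st.1 ++ [a], st.2 ++ [a + 1])
          else st
        else st)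
      ([], [0])
  let POST := pp.1 ++ [n - 1]
  let PRE := pp.2
  (PRE.zip POST).foldl
    (fun VAL p =>
      ((PySem.List.pyRange 0 (p.2 - p.1 + 1) 1).foldl
        (fun (st : List Int × Int) _ => (st.1 ++ [st.2], st.2 - 1)) (VAL, p.2 - p.1)).1)
    []

theorem aCore_eq_fillB (l2 : List (Option Int)) : aCore l2 = fillB l2 := by
  have hfun : (fun (VAL : List Int) (p : Int × Int) =>
      ((PySem.List.pyRange 0 (p.2 - p.1 + 1) 1).foldl
        (fun (st : List Int × Int) _ => (st.1 ++ [st.2], st.2 - 1)) (VAL, p.2 - p.1)).1)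
      = fun (VAL : List Int) (p : Int × Int) => VAL ++ cnt (p.2 - p.1) := by
    funext VAL p
    rw [innerfold]
    congr 1
    rw [PySem.List.length_pyRange_one]
    unfold cnt
    norm_num
  simp only [aCore]
  rw [pairfold ((l2.length : Int))
    (fun a => Option.map (· + 1) (PySem.List.pyGetD l2 (a + 1) none) ≠ PySem.List.pyGetD l2 a none)]
  rw [filter_eq_bnd, hfun, PySem.List.foldl_append_eq_flatMap]
  simp only [List.nil_append, List.singleton_append]
  cases l2 with
  | nil => simp [bnd, fillB, cnt]
  | cons y r => exact (main_cons r y).1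

theorem cleandic_eq_aCore (list3 : List Int) (DSCA : List (String × Int)) :
    cleandic list3 DSCA =
      aCore (list3.map (fun a => PySem.Dict.get? (PySem.Dict.ofList DSCA) (PySem.Int.toStr a))) := by
  simp only [cleandic, aCore, PySem.List.foldl_append_singleton_eq_map, List.nil_append]

-- ===== VERDICT (by name: the statement is the Claim_ definition above) =====
theorem cleandic_spec : Claim_equal_cleandic := by
  intro list3 DSCA _ _
  unfold Spec_cleandic cleandic_alt
  rw [cleandic_eq_aCore, aCore_eq_fillB]
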